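-- pv_equiv track=rewrite | github.com/Soumyajit-Dey-660/LeetCode-Solutions | Number Of Rectangles That Can Form The Largest Square/solution.py | countGoodRectangles
-- ===== SOURCE A (Python) =====
-- from typing import List
--
-- def countGoodRectangles(rectangles: List[List[int]]) -> int:
--     maxSize = 0
--     count = 0
--     for rectangle in rectangles:
--         if min(rectangle) > maxSize:
--             maxSize = min(rectangle)
--     for rectangle in rectangles:
--         if min(rectangle) == maxSize:
--             count += 1
--     return count
-- ===== SOURCE B (Python) =====
-- from typing import List
--
-- def countGoodRectangles(rectangles: List[List[int]]) -> int:
--     maxSize = 0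
--     count = 0
--     for rectangle in rectangles:
--         m = min(rectangle)
--         if m > maxSize:
--             maxSize = m
--             count = 1
--         elif m == maxSize:
--             count += 1
--     return count
-- ===== Notes on version B (the rewrite author's own statement) =====
-- stated objective: alternative
-- what changed: Replaces A's two sequential scans (one to find the maximal min-side, one to count rectangles attaining it) by a single pass maintaining the running maximum and its tally together, resetting the tally when a new maximum appears.
import Mathlib
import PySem

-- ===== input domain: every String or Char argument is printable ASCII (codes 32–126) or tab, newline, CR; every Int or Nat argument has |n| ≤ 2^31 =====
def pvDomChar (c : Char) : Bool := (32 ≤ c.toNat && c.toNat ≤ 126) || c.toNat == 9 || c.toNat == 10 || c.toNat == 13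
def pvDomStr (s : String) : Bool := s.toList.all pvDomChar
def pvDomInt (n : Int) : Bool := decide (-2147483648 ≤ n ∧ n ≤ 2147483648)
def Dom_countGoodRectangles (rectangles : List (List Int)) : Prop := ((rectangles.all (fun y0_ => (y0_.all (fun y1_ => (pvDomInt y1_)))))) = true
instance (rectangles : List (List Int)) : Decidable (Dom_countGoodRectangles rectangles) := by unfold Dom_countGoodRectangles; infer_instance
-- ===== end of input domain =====

-- B folds once over the rectangles, maintaining the running max min-side and its tally together, instead of A's two sequential scans (alternative decomposition); return value proved equal on all inputs where A returns (rectangles all nonempty).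


-- ===== PORT A =====
-- two passes: first the running maximum of min(rectangle), then a count of equal mins
def countGoodRectangles (rectangles : List (List Int)) : Int :=
  let maxSize : Int := rectangles.foldl (fun maxSize rectangle =>
    match PySem.List.min? rectangle (fun y => y) with
    | some m => if m > maxSize then m else maxSize
    | none => maxSize) 0   -- none = min of empty raises ValueError; excluded by Pre_
  rectangles.foldl (fun count rectangle =>
    match PySem.List.min? rectangle (fun y => y) with
    | some m => if m = maxSize then count + 1 else count
    | none => count) 0

-- ===== PORT B =====
-- one pass carrying (maxSize, count)
def countGoodRectangles_alt (rectangles : List (List Int)) : Int :=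
  (rectangles.foldl (fun (st : Int × Int) rectangle =>
    match PySem.List.min? rectangle (fun y => y) with
    | some m =>
        if m > st.1 then (m, 1)
        else if m = st.1 then (st.1, st.2 + 1)
        else st
    | none => st) (0, 0)).2   -- none branch unreachable under Pre_

-- ===== PRECONDITION & SPEC =====
-- Pre_ excludes inputs containing an empty rectangle, on which Python's min of an empty sequence raises ValueError (in both A and B).
def Pre_countGoodRectangles (rectangles : List (List Int)) : Prop := ∀ r ∈ rectangles, r ≠ []
instance (rectangles : List (List Int)) : Decidable (Pre_countGoodRectangles rectangles) := by unfold Pre_countGoodRectangles; infer_instance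
def pvWitness_countGoodRectangles : List (List Int) := [[5, 8], [3, 9], [5, 12], [16, 5]]

def Spec_countGoodRectangles (rectangles : List (List Int)) (out : Int) : Prop := out = countGoodRectangles_alt rectangles
instance (rectangles : List (List Int)) (out : Int) : Decidable (Spec_countGoodRectangles rectangles out) := by unfold Spec_countGoodRectangles; infer_instance

-- ===== CLAIM (what is proved, stated in full; the proofs are below) =====
def Claim_equal_countGoodRectangles : Prop := ∀ (rectangles : List (List Int)), Dom_countGoodRectangles rectangles → Pre_countGoodRectangles rectangles → Spec_countGoodRectangles rectangles (countGoodRectangles rectangles)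

-- ===== LEMMAS AND PROOFS =====

-- the min of a nonempty rectangle (the `some` value of PySem.List.min?)
def pvMin (r : List Int) : Int := (PySem.List.min? r (fun y => y)).getD 0

-- the running maximum of a list of mins, started at 0 (A's first pass)
def pvRunMax (ms : List Int) : Int := ms.foldl (fun a m => max a m) 0

-- the counting fold (A's second pass)
def pvCnt (M : Int) (ms : List Int) : Int := ms.foldl (fun c m => if m = M then c + 1 else c) 0

theorem pvMin_some {r : List Int} (h : r ≠ []) :
    PySem.List.min? r (fun y => y) = some (pvMin r) := by
  cases r with
  | nil => exact absurd rfl h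
  | cons x t => simp [pvMin, PySem.List.min?_id_cons]

-- A's first pass over rectangles = pvRunMax of the list of mins
theorem foldA1_eq (l : List (List Int)) (h : ∀ r ∈ l, r ≠ []) :
    l.foldl (fun maxSize rectangle =>
      match PySem.List.min? rectangle (fun y => y) with
      | some m => if m > maxSize then m else maxSize
      | none => maxSize) 0
    = pvRunMax (l.map pvMin) := by
  unfold pvRunMax
  generalize (0 : Int) = a
  induction l generalizing a with
  | nil => rfl
  | cons r t ih =>
      simp only [List.foldl_cons, List.map_cons, pvMin_some (h r (.head t))]
      rw [ih (fun x hx => h x (.tail r hx))]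
      congr 1
      rcases lt_or_ge a (pvMin r) with hlt | hge
      · simp [hlt, max_eq_right hlt.le]
      · simp [not_lt.mpr hge, max_eq_left hge]

-- A's second pass = pvCnt of the list of mins
theorem foldA2_eq (l : List (List Int)) (M : Int) (h : ∀ r ∈ l, r ≠ []) :
    l.foldl (fun count rectangle =>
      match PySem.List.min? rectangle (fun y => y) with
      | some m => if m = M then count + 1 else count
      | none => count) 0
    = pvCnt M (l.map pvMin) := by
  unfold pvCnt
  generalize (0 : Int) = c
  induction l generalizing c with
  | nil => rfl
  | cons r t ih =>
      simp only [List.foldl_cons, List.map_cons, pvMin_some (h r (.head t))]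
      exact ih (fun x hx => h x (.tail r hx)) _

-- B's pass = the coupled fold over the list of mins
theorem foldB_eq (l : List (List Int)) (st : Int × Int) (h : ∀ r ∈ l, r ≠ []) :
    l.foldl (fun (st : Int × Int) rectangle =>
      match PySem.List.min? rectangle (fun y => y) with
      | some m =>
          if m > st.1 then (m, 1)
          else if m = st.1 then (st.1, st.2 + 1)
          else st
      | none => st) st
    = (l.map pvMin).foldl (fun (st : Int × Int) m =>
        if m > st.1 then (m, 1)
        else if m = st.1 then (st.1, st.2 + 1)
        else st) st := by
  induction l generalizing st with
  | nil => rfl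
  | cons r t ih =>
      simp only [List.foldl_cons, List.map_cons, pvMin_some (h r (.head t))]
      exact ih _ (fun x hx => h x (.tail r hx))

theorem pvRunMax_append (t : List Int) (m : Int) :
    pvRunMax (t ++ [m]) = max (pvRunMax t) m := by
  simp [pvRunMax]

theorem pvCnt_append (M : Int) (t : List Int) (m : Int) :
    pvCnt M (t ++ [m]) = pvCnt M t + (if m = M then 1 else 0) := by
  unfold pvCnt
  rw [List.foldl_append]
  simp only [List.foldl_cons, List.foldl_nil]
  by_cases hm : m = M
  · rw [if_pos hm, if_pos hm]
  · simp [hm]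

theorem pvCnt_zero (M : Int) (t : List Int) (h : ∀ x ∈ t, x ≠ M) :
    pvCnt M t = 0 := by
  unfold pvCnt
  induction t with
  | nil => rfl
  | cons y s ihs =>
      simp only [List.foldl_cons, if_neg (h y (.head s))]
      exact ihs (fun x hx => h x (.tail y hx))

theorem pvCnt_congr (M M' : Int) (t : List Int) (h : M = M') : pvCnt M t = pvCnt M' t := by rw [h]

-- the heart: B's coupled one-pass fold equals (running max, count of mins equal to it)
theorem coupled_eq (ms : List Int) :
    ms.foldl (fun (st : Int × Int) m =>
        if m > st.1 then (m, 1)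
        else if m = st.1 then (st.1, st.2 + 1)
        else st) (0, 0)
    = (pvRunMax ms, pvCnt (pvRunMax ms) ms) := by
  induction ms using List.reverseRecOn with
  | nil => simp [pvRunMax, pvCnt]
  | append_singleton t m ih =>
      have hbound : ∀ y ∈ t, y ≤ pvRunMax t := by
        intro y hy
        simpa [pvRunMax, max_comm] using (PySem.List.le_foldl_max t (0 : Int)).2 y hy
      rw [List.foldl_append, ih]
      simp only [List.foldl_cons, List.foldl_nil, pvRunMax_append, pvCnt_append]
      rcases lt_trichotomy (pvRunMax t) m with hlt | heq | hgt
      · -- new maximum: count restarts at 1; no earlier min can equal m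
        have hmax : max (pvRunMax t) m = m := max_eq_right hlt.le
        rw [if_pos hlt, hmax]
        rw [pvCnt_zero m t (fun x hx => by have := hbound x hx; omega)]
        simp
      · -- equal: maximum unchanged, count increments
        have hmax : max (pvRunMax t) m = pvRunMax t := by rw [heq]; simp
        rw [if_neg (by omega : ¬ m > pvRunMax t), if_pos heq.symm, hmax]
        rw [pvCnt_congr _ _ t heq, heq]
        simp
      · -- smaller: nothing changes
        have hmax : max (pvRunMax t) m = pvRunMax t := max_eq_left hgt.le
        rw [if_neg (by omega : ¬ m > pvRunMax t), if_neg (ne_of_lt hgt), hmax]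
        simp [if_neg (ne_of_lt hgt)]

-- ===== VERDICT (by name: the statement is the Claim_ definition above) =====
theorem countGoodRectangles_spec : Claim_equal_countGoodRectangles := by
  intro rectangles _ hpre
  unfold Spec_countGoodRectangles countGoodRectangles countGoodRectangles_alt
  rw [foldA1_eq _ hpre, foldB_eq _ _ hpre, coupled_eq, foldA2_eq _ _ hpre]
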